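-- pv_equiv track=rewrite | github.com/cenyou/active-learning-framework | alef/kernels/kernel_kernel_grammar_tree.py | create_hash_array_mapping
-- ===== SOURCE A (Python) =====
-- from typing import Dict, List, Optional, Tuple
--
-- StructuredDict = Dict[int, List]
--
-- def create_hash_array_mapping(tree_dict_list: List[StructuredDict]) -> StructuredDict:
--     index_dict = {}
--     index = 0
--     for tree_dict in tree_dict_list:
--         for hash in tree_dict:
--             if not hash in index_dict:
--                 index_dict[hash] = [index]
--                 index += 1
--     return index_dict
-- ===== SOURCE B (Python) =====
-- def create_hash_array_mapping(tree_dict_list):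
--     flat = [h for td in tree_dict_list for h in td]
--     # walk backwards, overwriting: each key ends up mapped to its FIRST position in flat
--     first = {}
--     for pos in range(len(flat) - 1, -1, -1):
--         first[flat[pos]] = pos
--     # rank the keys by first-occurrence position
--     order = sorted(first, key=lambda h: first[h])
--     return {h: [rank] for rank, h in enumerate(order)}
-- ===== Notes on version B (the rewrite author's own statement) =====
-- stated objective: alternative
-- what changed: Replaces A's single forward pass with a membership-guarded counter by a different algorithm: a backwards overwrite pass that records each key's first-occurrence position in the flattened key stream, a sort of the keys by that position, and an enumeration of the sorted keys.
import Mathlib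
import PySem

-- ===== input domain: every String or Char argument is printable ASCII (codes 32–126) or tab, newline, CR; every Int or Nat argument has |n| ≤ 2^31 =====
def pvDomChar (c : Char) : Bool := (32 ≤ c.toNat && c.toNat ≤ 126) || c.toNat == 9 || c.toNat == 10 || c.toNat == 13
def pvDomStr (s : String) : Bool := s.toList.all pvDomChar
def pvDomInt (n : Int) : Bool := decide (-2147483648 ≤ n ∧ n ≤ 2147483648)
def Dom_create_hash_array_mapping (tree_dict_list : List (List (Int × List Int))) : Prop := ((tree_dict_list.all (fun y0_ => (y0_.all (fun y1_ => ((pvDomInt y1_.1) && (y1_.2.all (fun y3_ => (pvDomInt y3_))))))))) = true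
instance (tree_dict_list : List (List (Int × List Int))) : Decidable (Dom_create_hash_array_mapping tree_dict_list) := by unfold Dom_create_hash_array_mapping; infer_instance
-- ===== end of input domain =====

-- B computes the result by a different algorithm: record each key's first-occurrence position via a
-- backwards overwrite pass, sort the keys by that position, then enumerate (alternative, same result).


-- ===== PORT A =====
-- the loop body: 'if not hash in index_dict: index_dict[hash] = [index]; index += 1'
def pvStepA (st : PySem.Dict Int (List Int) × Int) (hash : Int) : PySem.Dict Int (List Int) × Int :=
  if st.1.contains hash then st else (st.1.insert hash [st.2], st.2 + 1)

def create_hash_array_mapping (tree_dict_list : List (List (Int × List Int))) : List (Int × List Int) :=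
  -- index_dict = {}; index = 0; for tree_dict in tree_dict_list: for hash in tree_dict: …
  (tree_dict_list.foldl
      (fun st tree_dict => (tree_dict.map Prod.fst).foldl pvStepA st)
      (PySem.Dict.empty, 0)).1.items

-- ===== PORT B =====
def create_hash_array_mapping_alt (tree_dict_list : List (List (Int × List Int))) : List (Int × List Int) :=
  -- flat = [h for td in tree_dict_list for h in td]
  let flat : List Int := tree_dict_list.flatMap (fun td => td.map Prod.fst)
  -- first = {}; for pos in range(len(flat)-1, -1, -1): first[flat[pos]] = pos
  let first : PySem.Dict Int Int :=
    (PySem.List.pyRange ((flat.length : Int) - 1) (-1) (-1)).foldl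
      (fun d pos => d.insert (PySem.List.pyGetD flat pos 0) pos) PySem.Dict.empty
  -- order = sorted(first, key=lambda h: first[h])  (first[h] never raises: h is a key; ported as getD h 0)
  let order : List Int := PySem.List.sorted first.keys (fun h => first.getD h 0) false
  -- {h: [rank] for rank, h in enumerate(order)}
  ((PySem.List.enumerate order).foldl
      (fun (d : PySem.Dict Int (List Int)) p => d.insert p.2 [p.1])
      PySem.Dict.empty).items

-- ===== PRECONDITION & SPEC =====
def Spec_create_hash_array_mapping (tree_dict_list : List (List (Int × List Int))) (out : List (Int × List Int)) : Prop := out = create_hash_array_mapping_alt tree_dict_list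
instance (tree_dict_list : List (List (Int × List Int))) (out : List (Int × List Int)) : Decidable (Spec_create_hash_array_mapping tree_dict_list out) := by unfold Spec_create_hash_array_mapping; infer_instance

-- ===== CLAIM (what is proved, stated in full; the proofs are below) =====
def Claim_equal_create_hash_array_mapping : Prop := ∀ (tree_dict_list : List (List (Int × List Int))), Dom_create_hash_array_mapping tree_dict_list → Spec_create_hash_array_mapping tree_dict_list (create_hash_array_mapping tree_dict_list)

-- ===== LEMMAS AND PROOFS =====

-- the dict A has built after seeing exactly the distinct keys u, in order
def pvToD (u : List Int) : PySem.Dict Int (List Int) :=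
  PySem.Dict.mk ((PySem.List.enumerate u).map (fun p => (p.2, [p.1])))

theorem pvEnumerate_append_singleton (u : List Int) (h : Int) (s : Int) :
    PySem.List.enumerate (u ++ [h]) s = PySem.List.enumerate u s ++ [(s + u.length, h)] := by
  induction u generalizing s with
  | nil => simp [PySem.List.enumerate_cons, PySem.List.enumerate_nil]
  | cons x xs ih =>
      simp [PySem.List.enumerate_cons, ih]
      ring_nf

theorem pvKeys_toD (u : List Int) : (pvToD u).keys = u := by
  simp only [pvToD, PySem.Dict.keys]
  simp [List.map_map, Function.comp_def, PySem.List.map_snd_enumerate]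

theorem pvLoop_inv (ks : List Int) : ∀ (u : List Int), u.Nodup →
    ks.foldl pvStepA (pvToD u, (u.length : Int)) =
      (pvToD (ks.foldl PySem.Set.add u), ((ks.foldl PySem.Set.add u).length : Int)) := by
  induction ks with
  | nil => intro u _; simp
  | cons h ks ih =>
      intro u hu
      by_cases hm : h ∈ u
      · have hc : (pvToD u).contains h = true := by
          rw [PySem.Dict.contains_iff_mem_keys, pvKeys_toD]; exact hm
        have hadd : PySem.Set.add u h = u := by
          simp [PySem.Set.add, PySem.Set.contains_eq_listContains, hm]
        simp only [List.foldl_cons, pvStepA, hc, if_true, hadd]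
        exact ih u hu
      · have hc : (pvToD u).contains h = false := by
          rw [Bool.eq_false_iff]
          intro hcon
          rw [PySem.Dict.contains_iff_mem_keys, pvKeys_toD] at hcon
          exact hm hcon
        have hins : (pvToD u).insert h [(u.length : Int)] = pvToD (u ++ [h]) := by
          apply PySem.Dict.ext
          rw [PySem.Dict.items_insert_of_not_contains _ _ hc]
          simp [pvToD, pvEnumerate_append_singleton]
        have hadd : PySem.Set.add u h = u ++ [h] := by
          simp [PySem.Set.add, PySem.Set.contains_eq_listContains, hm]
        have hnd : (u ++ [h]).Nodup := by
          simp only [List.nodup_append, List.nodup_singleton]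
          refine ⟨hu, trivial, ?_⟩
          intro a ha b hb
          simp only [List.mem_singleton] at hb
          subst hb
          exact fun e => hm (e ▸ ha)
        simp only [List.foldl_cons, pvStepA, hc, Bool.false_eq_true, if_false, hins, hadd]
        have := ih (u ++ [h]) hnd
        simpa [List.length_append] using this

theorem pvNested_eq_flat (tdl : List (List (Int × List Int)))
    (st : PySem.Dict Int (List Int) × Int) :
    tdl.foldl (fun st td => (td.map Prod.fst).foldl pvStepA st) st =
      (tdl.flatMap (fun td => td.map Prod.fst)).foldl pvStepA st := by
  induction tdl generalizing st with
  | nil => rfl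
  | cons td tdl ih => simp [List.flatMap_cons, List.foldl_append, ih]

-- B-side: the first pair of each distinct snd, in order of appearance
def pvFirstsStep (acc : List (Int × Int)) (p : Int × Int) : List (Int × Int) :=
  if acc.any (fun q => q.2 == p.2) then acc else acc ++ [p]

theorem pvFirsts_map_snd (ps : List (Int × Int)) : ∀ (acc : List (Int × Int)),
    (ps.foldl pvFirstsStep acc).map (·.2) =
      ps.foldl (fun s p => PySem.Set.add s p.2) (acc.map (·.2)) := by
  induction ps with
  | nil => intro acc; rfl
  | cons p ps ih =>
      intro acc
      have hstep : (pvFirstsStep acc p).map (·.2) = PySem.Set.add (acc.map (·.2)) p.2 := by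
        simp only [pvFirstsStep, PySem.Set.add, PySem.Set.contains_eq_listContains,
          List.contains_eq_any_beq, List.any_map]
        by_cases hb : acc.any (fun q => q.2 == p.2)
        · have : acc.any (fun q => p.2 == q.2) = true := by
            simp only [List.any_eq_true] at hb ⊢
            obtain ⟨q, hq, he⟩ := hb
            exact ⟨q, hq, by simpa [BEq.comm] using he⟩
          simp [hb, Function.comp_def, this]
        · have : acc.any (fun q => p.2 == q.2) = false := by
            simp only [Bool.not_eq_true, List.any_eq_false] at hb ⊢
            intro q hq
            have := hb q hq
            simpa [BEq.comm] using this
          simp [hb, Function.comp_def, this]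
      rw [List.foldl_cons, List.foldl_cons, ih, hstep]

theorem pvFirsts_sublist (ps : List (Int × Int)) : ∀ (acc : List (Int × Int)),
    ∃ ext, ps.foldl pvFirstsStep acc = acc ++ ext ∧ ext.Sublist ps := by
  induction ps with
  | nil => intro acc; exact ⟨[], by simp, List.Sublist.refl _⟩
  | cons p ps ih =>
      intro acc
      rw [List.foldl_cons]
      by_cases hb : acc.any (fun q => q.2 == p.2)
      · rw [show pvFirstsStep acc p = acc from by simp [pvFirstsStep, hb]]
        obtain ⟨ext, he, hs⟩ := ih acc
        exact ⟨ext, he, hs.cons p⟩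
      · rw [show pvFirstsStep acc p = acc ++ [p] from by simp [pvFirstsStep, hb]]
        obtain ⟨ext, he, hs⟩ := ih (acc ++ [p])
        exact ⟨p :: ext, by simp [he], hs.cons₂ p⟩

theorem pvFirsts_find? (ps : List (Int × Int)) : ∀ (acc : List (Int × Int)) (p : Int × Int),
    p ∈ ps.foldl pvFirstsStep acc →
      p ∈ acc ∨ (ps.find? (fun q => q.2 == p.2) = some p ∧ p.2 ∉ acc.map (·.2)) := by
  induction ps with
  | nil => intro acc p hp; exact Or.inl hp
  | cons r ps ih =>
      intro acc p hp
      rw [List.foldl_cons] at hp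
      by_cases hb : acc.any (fun q => q.2 == r.2)
      · rw [show pvFirstsStep acc r = acc from by simp [pvFirstsStep, hb]] at hp
        rcases ih acc p hp with h | ⟨hf, hm⟩
        · exact Or.inl h
        · refine Or.inr ⟨?_, hm⟩
          have hne : (r.2 == p.2) = false := by
            by_contra hc
            rw [Bool.not_eq_false, beq_iff_eq] at hc
            rw [List.any_eq_true] at hb
            obtain ⟨q, hq, he⟩ := hb
            rw [beq_iff_eq] at he
            exact hm (by
              rw [List.mem_map]
              exact ⟨q, hq, by rw [he, hc]⟩)
          rw [List.find?_cons, hne]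
          exact hf
      · rw [show pvFirstsStep acc r = acc ++ [r] from by simp [pvFirstsStep, hb]] at hp
        rcases ih (acc ++ [r]) p hp with h | ⟨hf, hm⟩
        · rw [List.mem_append, List.mem_singleton] at h
          rcases h with h | h
          · exact Or.inl h
          · subst h
            refine Or.inr ⟨by rw [List.find?_cons, beq_self_eq_true], ?_⟩
            intro hmem
            rw [List.mem_map] at hmem
            obtain ⟨q, hq, he⟩ := hmem
            simp only [Bool.not_eq_true, List.any_eq_false] at hb
            have := hb q hq
            rw [he] at this
            simp at this
        · rw [List.map_append, List.mem_append] at hm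
          push Not at hm
          have hne : (r.2 == p.2) = false := by
            by_contra hc
            rw [Bool.not_eq_false, beq_iff_eq] at hc
            exact hm.2 (by simp [hc])
          refine Or.inr ⟨by rw [List.find?_cons, hne]; exact hf, hm.1⟩

theorem pvGetD_fold (ps : List (Int × Int)) : ∀ (e : PySem.Dict Int Int) (h z : Int),
    (ps.foldl (fun d p => d.insert p.2 p.1) e).getD h z =
      match ps.reverse.find? (fun q => q.2 == h) with
      | some q => q.1
      | none => e.getD h z := by
  induction ps with
  | nil => intro e h z; rfl
  | cons p ps ih =>
      intro e h z
      rw [List.foldl_cons, ih, List.reverse_cons, List.find?_append]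
      cases hfind : ps.reverse.find? (fun q => q.2 == h) with
      | some q => simp
      | none =>
          simp only []
          by_cases hph : p.2 = h
          · subst hph
            simp [PySem.Dict.getD_insert_self]
          · have hbe : (p.2 == h) = false := by simpa using hph
            simp [hbe, PySem.Dict.getD_insert_of_ne (hne := Ne.symm hph)]


theorem pvA_items (flat : List Int) :
    (flat.foldl pvStepA (PySem.Dict.empty, 0)).1.items =
      (PySem.List.enumerate (PySem.List.dedup flat)).map (fun p => (p.2, [p.1])) := by
  have h0 : (PySem.Dict.empty : PySem.Dict Int (List Int)) = pvToD [] := rfl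
  have hinv := pvLoop_inv flat [] List.nodup_nil
  have hded : flat.foldl PySem.Set.add [] = PySem.List.dedup flat := by
    rw [PySem.List.dedup_eq_ofList, PySem.Set.ofList_eq_foldl]
  rw [h0]
  have : ((0 : Int)) = ((List.length ([] : List Int) : Int)) := rfl
  rw [this, hinv, hded]
  rfl

theorem pvB_dict (flat : List Int) :
    (PySem.List.pyRange ((flat.length : Int) - 1) (-1) (-1)).foldl
        (fun d pos => d.insert (PySem.List.pyGetD flat pos 0) pos) PySem.Dict.empty =
      ((PySem.List.enumerate flat).reverse).foldl
        (fun d p => d.insert p.2 p.1) PySem.Dict.empty := by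
  have hr : PySem.List.pyRange ((flat.length : Int) - 1) (-1) (-1) =
      (PySem.List.pyRange 0 (flat.length : Int) 1).reverse := by
    rw [PySem.List.pyRange_neg_one_eq_reverse]
    norm_num
  have he : PySem.List.enumerate flat 0 =
      (PySem.List.pyRange 0 (flat.length : Int) 1).map (fun j => (j, PySem.List.pyGetD flat j 0)) := by
    have := PySem.List.enumerate_eq_map_pyRange (xs := flat) (d := 0)
    simpa [PySem.List.len_eq] using this
  rw [hr, he, ← List.map_reverse, List.foldl_map]

-- ===== VERDICT (by name: the statement is the Claim_ definition above) =====
theorem create_hash_array_mapping_spec : Claim_equal_create_hash_array_mapping := by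
  intro tdl _
  unfold Spec_create_hash_array_mapping create_hash_array_mapping create_hash_array_mapping_alt
  rw [pvNested_eq_flat]
  set flat := tdl.flatMap (fun td => td.map Prod.fst) with hflat
  set u := PySem.List.dedup flat with hu
  set ps := PySem.List.enumerate flat 0 with hps
  set F := ps.foldl pvFirstsStep [] with hF
  set d := ps.reverse.foldl (fun (d : PySem.Dict Int Int) p => d.insert p.2 p.1) PySem.Dict.empty
    with hd
  -- the backwards loop builds d
  have hdict := pvB_dict flat
  -- keys of d
  have hkeys : d.keys = PySem.Set.ofList flat.reverse := by
    rw [hd]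
    rw [PySem.Dict.keys_foldl_insert_key (key := fun p : Int × Int => p.2)
      (f := fun (_ : PySem.Dict Int Int) (p : Int × Int) => p.1)]
    rw [PySem.Dict.keys_empty, PySem.Set.update_nil_left]
    rw [show List.map (fun p : Int × Int => p.2) ps.reverse = flat.reverse from by
      rw [List.map_reverse, show ps.map (fun p : Int × Int => p.2) = flat from
        PySem.List.map_snd_enumerate flat 0]]
  -- snd of the first-occurrence pairs is u
  have hmapsnd : F.map (fun p : Int × Int => p.2) = u := by
    rw [hF, pvFirsts_map_snd,
      show List.map (fun p : Int × Int => p.2) ([] : List (Int × Int)) = ([] : List Int) from rfl,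
      ← List.foldl_map,
      show ps.map (fun p : Int × Int => p.2) = flat from PySem.List.map_snd_enumerate flat 0]
    rw [hu, PySem.List.dedup_eq_ofList, PySem.Set.ofList_eq_foldl]
  -- u is a permutation of d.keys
  have hperm : u.Perm d.keys := by
    rw [hkeys]
    rw [List.perm_ext_iff_of_nodup (PySem.List.nodup_dedup flat) (PySem.Set.nodup_ofList _)]
    intro a
    rw [PySem.List.mem_dedup, PySem.Set.mem_ofList, List.mem_reverse]
  -- the dict maps each first pair's key to its position
  have hkey : ∀ p ∈ F, d.getD p.2 0 = p.1 := by
    intro p hp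
    rcases pvFirsts_find? ps [] p hp with h | ⟨hfind, _⟩
    · exact absurd h (List.not_mem_nil)
    · rw [hd, pvGetD_fold, List.reverse_reverse, hfind]
  -- u is strictly increasing under the position key
  have hpw : u.Pairwise (fun a b => d.getD a 0 < d.getD b 0) := by
    rw [← hmapsnd]
    rw [List.pairwise_map]
    have hsub : F.Sublist ps := by
      rcases pvFirsts_sublist ps [] with ⟨ext, he, hs⟩
      rw [hF, he, List.nil_append]
      exact hs
    have hlt : F.Pairwise (fun p q : Int × Int => p.1 < q.1) :=
      (PySem.List.pairwise_lt_enumerate flat 0).sublist hsub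
    refine hlt.imp_of_mem ?_
    intro a b ha hb hab
    rw [hkey a ha, hkey b hb]
    exact hab
  -- the sort rebuilds u
  have hsorted : PySem.List.sorted d.keys (fun h => d.getD h 0) false = u :=
    PySem.List.sorted_eq_of_perm_of_pairwise_lt _ _ _ hperm hpw
  -- assemble
  rw [pvA_items flat]
  show _ = ((PySem.List.enumerate (PySem.List.sorted
      ((PySem.List.pyRange ((flat.length : Int) - 1) (-1) (-1)).foldl
        (fun d pos => d.insert (PySem.List.pyGetD flat pos 0) pos) PySem.Dict.empty).keys
      (fun h => ((PySem.List.pyRange ((flat.length : Int) - 1) (-1) (-1)).foldl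
        (fun d pos => d.insert (PySem.List.pyGetD flat pos 0) pos) PySem.Dict.empty).getD h 0)
      false)).foldl
      (fun (d : PySem.Dict Int (List Int)) p => d.insert p.2 [p.1]) PySem.Dict.empty).items
  rw [hdict, ← hd, hsorted]
  have hfresh : ((PySem.List.enumerate u).foldl
      (fun (d : PySem.Dict Int (List Int)) p => d.insert p.2 [p.1]) PySem.Dict.empty).items =
      (PySem.Dict.empty : PySem.Dict Int (List Int)).items ++
        (PySem.List.enumerate u).map (fun p => (p.2, [p.1])) := by
    apply PySem.Dict.items_foldl_insert_fresh
    · intro a _; exact PySem.Dict.contains_empty _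
    · rw [show (PySem.List.enumerate u).map (fun p : Int × Int => p.2) = u from
        PySem.List.map_snd_enumerate u 0]
      exact PySem.List.nodup_dedup flat
  rw [hfresh]
  rfl
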